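-- pv_equiv track=rewrite | github.com/JoeySoprano420/ModuSynthX | Grammar.py | compile_to_gm_bytecode
-- ===== SOURCE A (Python) =====
-- gm_bytecode_instructions = {
--     "MODSET": "0x01",       # Apply modifier to next instruction
--     "WRITEOUT": "0x02",     # Output to system or user space
--     "ALLOCREG": "0x03",     # Allocate virtual register/memory
--     "LINK": "0x04",         # Link modules or contexts
--     "FLOWCMP": "0x05",      # Compress execution flow
--     "RELEASE": "0x06",      # Release compressed flow
--     "PING": "0x07",         # Error correction trigger
--     "SIFT": "0x08",         # Garbage sifting and cleanup
--     "INFER": "0x09",        # Trigger contextual inference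
--     "TRIGGER": "0x0A",      # Explicit trigger execution
--     "PAUSE": "0x0B",        # Execution pause
--     "END": "0x0C"           # End of block/script
-- }
--
-- def compile_to_gm_bytecode(code_lines):
--     compiled = []
--     for line in code_lines:
--         if "write" in line:
--             compiled.append((gm_bytecode_instructions["MODSET"], "quick"))
--             compiled.append((gm_bytecode_instructions["WRITEOUT"], "@console", "'Hello, ModuSynthX World!'"))
--         elif "ping" in line:
--             compiled.append((gm_bytecode_instructions["PING"], "smart"))
--         elif "sift.purge" in line:
--             compiled.append((gm_bytecode_instructions["SIFT"], "$TempTokens", "5"))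
--         elif "flow.compress" in line:
--             compiled.append((gm_bytecode_instructions["FLOWCMP"], "idle"))
--         elif "trigger.release" in line:
--             compiled.append((gm_bytecode_instructions["RELEASE"], "interaction-heavy", "$ResponseMem"))
--         elif "infer.methods" in line:
--             compiled.append((gm_bytecode_instructions["INFER"], "$AssistantCore", "undefined_calls"))
--         elif "pause" in line:
--             compiled.append((gm_bytecode_instructions["MODSET"], "briefly"))
--             compiled.append((gm_bytecode_instructions["PAUSE"],))
--     compiled.append((gm_bytecode_instructions["END"],))
--     return compiled
-- ===== SOURCE B (Python) =====
-- # Two-phase recompiler: classify each line to a tag, expand tags via an emission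
-- # map, and assemble the bytecode back-to-front (END first, lines prepended in
-- # reverse), instead of A's single forward pass with a hard-coded if/elif chain.
-- _KEYS = ["write", "ping", "sift.purge", "flow.compress",
--          "trigger.release", "infer.methods", "pause"]
-- _EMIT = {
--     "write": [("0x01", "quick"), ("0x02", "@console", "'Hello, ModuSynthX World!'")],
--     "ping": [("0x07", "smart")],
--     "sift.purge": [("0x08", "$TempTokens", "5")],
--     "flow.compress": [("0x05", "idle")],
--     "trigger.release": [("0x06", "interaction-heavy", "$ResponseMem")],
--     "infer.methods": [("0x09", "$AssistantCore", "undefined_calls")],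
--     "pause": [("0x01", "briefly"), ("0x0B",)],
-- }
--
-- def _classify(line):
--     for k in _KEYS:
--         if k in line:
--             return k
--     return None
--
-- def compile_to_gm_bytecode(code_lines):
--     out = [("0x0C",)]
--     for line in reversed(code_lines):
--         tag = _classify(line)
--         if tag is not None:
--             out = _EMIT[tag] + out
--     return out
-- ===== Notes on version B (the rewrite author's own statement) =====
-- stated objective: alternative
-- what changed: Splits the work into two phases (a classifier that maps a line to a tag, and an emission map that expands tags into instruction tuples) and assembles the bytecode back-to-front, starting from the END instruction and prepending each line's emission while iterating the lines in reverse, instead of A's single forward pass with a hard-coded if/elif chain appending as it goes.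
import Mathlib
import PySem

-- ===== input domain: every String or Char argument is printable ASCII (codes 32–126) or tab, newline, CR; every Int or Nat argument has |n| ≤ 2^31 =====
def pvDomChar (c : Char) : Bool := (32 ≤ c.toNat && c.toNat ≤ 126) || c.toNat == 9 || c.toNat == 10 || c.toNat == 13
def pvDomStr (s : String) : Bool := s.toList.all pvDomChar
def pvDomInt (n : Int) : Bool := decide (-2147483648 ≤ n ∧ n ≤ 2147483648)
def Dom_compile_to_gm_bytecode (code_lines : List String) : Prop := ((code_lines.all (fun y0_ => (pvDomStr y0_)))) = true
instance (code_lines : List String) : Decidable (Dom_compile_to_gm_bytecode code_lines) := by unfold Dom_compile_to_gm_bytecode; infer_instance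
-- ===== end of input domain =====

-- B re-decomposes A's forward if/elif pass into a classify→emit two-phase pipeline
-- assembled back-to-front (objective: alternative; same cost).


-- ===== PORT A =====
-- module-level dict gm_bytecode_instructions; every lookup A makes is on a present key,
-- so getD "" is exact here.
def gm_bytecode_instructions : PySem.Dict String String := PySem.Dict.mk
  [("MODSET", "0x01"), ("WRITEOUT", "0x02"), ("ALLOCREG", "0x03"), ("LINK", "0x04"),
   ("FLOWCMP", "0x05"), ("RELEASE", "0x06"), ("PING", "0x07"), ("SIFT", "0x08"),
   ("INFER", "0x09"), ("TRIGGER", "0x0A"), ("PAUSE", "0x0B"), ("END", "0x0C")]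

def compile_to_gm_bytecode (code_lines : List String) : List (List String) :=
  (code_lines.foldl (fun compiled line =>
    if PySem.Str.isIn "write" line then
      (compiled ++ [[gm_bytecode_instructions.getD "MODSET" "", "quick"]])
        ++ [[gm_bytecode_instructions.getD "WRITEOUT" "", "@console", "'Hello, ModuSynthX World!'"]]
    else if PySem.Str.isIn "ping" line then
      compiled ++ [[gm_bytecode_instructions.getD "PING" "", "smart"]]
    else if PySem.Str.isIn "sift.purge" line then
      compiled ++ [[gm_bytecode_instructions.getD "SIFT" "", "$TempTokens", "5"]]
    else if PySem.Str.isIn "flow.compress" line then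
      compiled ++ [[gm_bytecode_instructions.getD "FLOWCMP" "", "idle"]]
    else if PySem.Str.isIn "trigger.release" line then
      compiled ++ [[gm_bytecode_instructions.getD "RELEASE" "", "interaction-heavy", "$ResponseMem"]]
    else if PySem.Str.isIn "infer.methods" line then
      compiled ++ [[gm_bytecode_instructions.getD "INFER" "", "$AssistantCore", "undefined_calls"]]
    else if PySem.Str.isIn "pause" line then
      (compiled ++ [[gm_bytecode_instructions.getD "MODSET" "", "briefly"]])
        ++ [[gm_bytecode_instructions.getD "PAUSE" ""]]
    else compiled) [])
  ++ [[gm_bytecode_instructions.getD "END" ""]]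

-- ===== PORT B =====
def pvKeys : List String :=
  ["write", "ping", "sift.purge", "flow.compress", "trigger.release", "infer.methods", "pause"]

-- _EMIT dict of Source B; every lookup B makes is on a present key, so getD [] is exact here.
def pvEmit : PySem.Dict String (List (List String)) := PySem.Dict.mk
  [("write", [["0x01", "quick"], ["0x02", "@console", "'Hello, ModuSynthX World!'"]]),
   ("ping", [["0x07", "smart"]]),
   ("sift.purge", [["0x08", "$TempTokens", "5"]]),
   ("flow.compress", [["0x05", "idle"]]),
   ("trigger.release", [["0x06", "interaction-heavy", "$ResponseMem"]]),
   ("infer.methods", [["0x09", "$AssistantCore", "undefined_calls"]]),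
   ("pause", [["0x01", "briefly"], ["0x0B"]])]

-- _classify of Source B
def pvClassify : List String → String → Option String
  | [], _ => none
  | k :: rest, line => if PySem.Str.isIn k line then some k else pvClassify rest line

-- the reversed-iteration prepend loop of Source B, as a foldr over the lines
def compile_to_gm_bytecode_alt (code_lines : List String) : List (List String) :=
  code_lines.foldr (fun line out =>
    match pvClassify pvKeys line with
    | some tag => pvEmit.getD tag [] ++ out
    | none => out) [["0x0C"]]

-- ===== PRECONDITION & SPEC =====
def Spec_compile_to_gm_bytecode (code_lines : List String) (out : List (List String)) : Prop := out = compile_to_gm_bytecode_alt code_lines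
instance (code_lines : List String) (out : List (List String)) : Decidable (Spec_compile_to_gm_bytecode code_lines out) := by unfold Spec_compile_to_gm_bytecode; infer_instance

-- ===== CLAIM (what is proved, stated in full; the proofs are below) =====
def Claim_equal_compile_to_gm_bytecode : Prop := ∀ (code_lines : List String), Dom_compile_to_gm_bytecode code_lines → Spec_compile_to_gm_bytecode code_lines (compile_to_gm_bytecode code_lines)

-- ===== LEMMAS AND PROOFS =====

-- what one line contributes in B
def pvEmitOf (line : String) : List (List String) :=
  match pvClassify pvKeys line with
  | some tag => pvEmit.getD tag []
  | none => []

-- A's per-line elif chain appends exactly B's classify→emit contribution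
theorem pvLine_eq (line : String) (compiled : List (List String)) :
    (if PySem.Str.isIn "write" line then
      (compiled ++ [[gm_bytecode_instructions.getD "MODSET" "", "quick"]])
        ++ [[gm_bytecode_instructions.getD "WRITEOUT" "", "@console", "'Hello, ModuSynthX World!'"]]
    else if PySem.Str.isIn "ping" line then
      compiled ++ [[gm_bytecode_instructions.getD "PING" "", "smart"]]
    else if PySem.Str.isIn "sift.purge" line then
      compiled ++ [[gm_bytecode_instructions.getD "SIFT" "", "$TempTokens", "5"]]
    else if PySem.Str.isIn "flow.compress" line then
      compiled ++ [[gm_bytecode_instructions.getD "FLOWCMP" "", "idle"]]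
    else if PySem.Str.isIn "trigger.release" line then
      compiled ++ [[gm_bytecode_instructions.getD "RELEASE" "", "interaction-heavy", "$ResponseMem"]]
    else if PySem.Str.isIn "infer.methods" line then
      compiled ++ [[gm_bytecode_instructions.getD "INFER" "", "$AssistantCore", "undefined_calls"]]
    else if PySem.Str.isIn "pause" line then
      (compiled ++ [[gm_bytecode_instructions.getD "MODSET" "", "briefly"]])
        ++ [[gm_bytecode_instructions.getD "PAUSE" ""]]
    else compiled)
    = compiled ++ pvEmitOf line := by
  simp only [pvEmitOf, pvClassify, pvKeys]
  split_ifs <;>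
    simp [gm_bytecode_instructions, pvEmit, PySem.Dict.getD, PySem.Dict.get?]

-- A's whole forward fold collapses to acc ++ the concatenated per-line contributions
theorem pvFoldA (code_lines : List String) (acc : List (List String)) :
    code_lines.foldl (fun compiled line =>
      if PySem.Str.isIn "write" line then
        (compiled ++ [[gm_bytecode_instructions.getD "MODSET" "", "quick"]])
          ++ [[gm_bytecode_instructions.getD "WRITEOUT" "", "@console", "'Hello, ModuSynthX World!'"]]
      else if PySem.Str.isIn "ping" line then
        compiled ++ [[gm_bytecode_instructions.getD "PING" "", "smart"]]
      else if PySem.Str.isIn "sift.purge" line then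
        compiled ++ [[gm_bytecode_instructions.getD "SIFT" "", "$TempTokens", "5"]]
      else if PySem.Str.isIn "flow.compress" line then
        compiled ++ [[gm_bytecode_instructions.getD "FLOWCMP" "", "idle"]]
      else if PySem.Str.isIn "trigger.release" line then
        compiled ++ [[gm_bytecode_instructions.getD "RELEASE" "", "interaction-heavy", "$ResponseMem"]]
      else if PySem.Str.isIn "infer.methods" line then
        compiled ++ [[gm_bytecode_instructions.getD "INFER" "", "$AssistantCore", "undefined_calls"]]
      else if PySem.Str.isIn "pause" line then
        (compiled ++ [[gm_bytecode_instructions.getD "MODSET" "", "briefly"]])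
          ++ [[gm_bytecode_instructions.getD "PAUSE" ""]]
      else compiled) acc
    = acc ++ code_lines.flatMap pvEmitOf := by
  induction code_lines generalizing acc with
  | nil => simp
  | cons l rest ih =>
      simp only [List.foldl_cons, List.flatMap_cons]
      rw [pvLine_eq, ih, List.append_assoc]

-- B's backward foldr produces the same concatenation, followed by END
theorem pvFoldB (code_lines : List String) :
    compile_to_gm_bytecode_alt code_lines = code_lines.flatMap pvEmitOf ++ [["0x0C"]] := by
  unfold compile_to_gm_bytecode_alt
  induction code_lines with
  | nil => simp
  | cons l rest ih =>
      simp only [List.foldr_cons, List.flatMap_cons, ih, pvEmitOf]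
      cases pvClassify pvKeys l <;> simp

-- ===== VERDICT (by name: the statement is the Claim_ definition above) =====
theorem compile_to_gm_bytecode_spec : Claim_equal_compile_to_gm_bytecode := by
  intro code_lines _
  unfold Spec_compile_to_gm_bytecode compile_to_gm_bytecode
  rw [pvFoldA, pvFoldB]
  simp [gm_bytecode_instructions, PySem.Dict.getD, PySem.Dict.get?]
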